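-- pv_equiv track=rewrite | github.com/A8Trade/A8Trade | pandas_basic/pandas_basic3.py | identify_energy_bar_ranges
-- ===== SOURCE A (Python) =====
-- def identify_energy_bar_ranges(histogram):
--     start_index = None
--     ranges = []
--
--     for i in range(len(histogram)):
--         if histogram[i] > 0 and start_index is None:
--             start_index = i
--         elif histogram[i] <= 0 and start_index is not None:
--             ranges.append((start_index, i - 1))
--             start_index = None
--
--     # 处理最后一个能量柱子的情况
--     if start_index is not None:
--         ranges.append((start_index, len(histogram) - 1))
--
--     return ranges
-- ===== SOURCE B (Python) =====
-- def identify_energy_bar_ranges(histogram):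
--     n = len(histogram)
--     starts = [i for i in range(n) if histogram[i] > 0 and (i == 0 or histogram[i - 1] <= 0)]
--     ends = [i for i in range(n) if histogram[i] > 0 and (i == n - 1 or histogram[i + 1] <= 0)]
--     return list(zip(starts, ends))
-- ===== Notes on version B (the rewrite author's own statement) =====
-- stated objective: alternative
-- what changed: Replaces A's single-pass open/close state machine with two staged boundary-detection passes (a run starts where a positive bar follows a non-positive or the left edge, ends where one precedes a non-positive or the right edge) zipped together.
import Mathlib
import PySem

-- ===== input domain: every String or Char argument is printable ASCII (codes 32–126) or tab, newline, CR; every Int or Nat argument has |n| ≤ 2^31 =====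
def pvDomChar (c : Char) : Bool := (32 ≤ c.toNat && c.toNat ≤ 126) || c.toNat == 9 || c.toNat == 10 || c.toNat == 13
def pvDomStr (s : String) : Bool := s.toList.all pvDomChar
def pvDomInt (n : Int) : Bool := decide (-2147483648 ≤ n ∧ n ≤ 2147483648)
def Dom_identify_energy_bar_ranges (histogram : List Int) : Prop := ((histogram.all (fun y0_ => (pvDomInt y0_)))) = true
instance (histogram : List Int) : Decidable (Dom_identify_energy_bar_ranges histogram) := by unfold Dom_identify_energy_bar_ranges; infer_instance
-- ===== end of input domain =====

-- B changes: two staged boundary-detection passes (run starts / run ends found independently) zipped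
-- together, instead of A's single-pass open/close state machine; same O(n) cost.

-- ===== PORT A =====
-- Transcription of A's for-loop: i is the loop index, start_index/ranges are the loop state;
-- at loop end i equals len(histogram), so the final append uses i - 1 (= len(histogram) - 1).
def pvAGo : List Int → Int → Option Int → List (Int × Int) → List (Int × Int)
  | [], i, start_index, ranges =>
      match start_index with
      | some s => ranges ++ [(s, i - 1)]
      | none => ranges
  | v :: rest, i, start_index, ranges =>
      match start_index with
      | none =>
          if 0 < v then pvAGo rest (i + 1) (some i) ranges
          else pvAGo rest (i + 1) none ranges
      | some s =>
          if v ≤ 0 then pvAGo rest (i + 1) none (ranges ++ [(s, i - 1)])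
          else pvAGo rest (i + 1) (some s) ranges

def identify_energy_bar_ranges (histogram : List Int) : List (Int × Int) :=
  pvAGo histogram 0 none []

-- ===== PORT B =====
-- Transcription of Source B: the two range(n) comprehensions become filters over List.range n;
-- every index accessed (i, i-1 with i ≥ 1, i+1 with i < n-1) is in range, so getD is exact
-- for Python's histogram[...]; list(zip(...)) is the final zip, with range indices cast to Int.
def identify_energy_bar_ranges_alt (histogram : List Int) : List (Int × Int) :=
  let n := histogram.length
  let starts := (List.range n).filter (fun i =>
      decide (0 < histogram.getD i 0) && (i == 0 || decide (histogram.getD (i - 1) 0 ≤ 0)))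
  let ends := (List.range n).filter (fun i =>
      decide (0 < histogram.getD i 0) && (i == n - 1 || decide (histogram.getD (i + 1) 0 ≤ 0)))
  (starts.zip ends).map (fun p => ((p.1 : Int), (p.2 : Int)))

-- ===== PRECONDITION & SPEC =====
def Spec_identify_energy_bar_ranges (histogram : List Int) (out : List (Int × Int)) : Prop := out = identify_energy_bar_ranges_alt histogram
instance (histogram : List Int) (out : List (Int × Int)) : Decidable (Spec_identify_energy_bar_ranges histogram out) := by unfold Spec_identify_energy_bar_ranges; infer_instance

-- ===== CLAIM (what is proved, stated in full; the proofs are below) =====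
def Claim_equal_identify_energy_bar_ranges : Prop := ∀ (histogram : List Int), Dom_identify_energy_bar_ranges histogram → Spec_identify_energy_bar_ranges histogram (identify_energy_bar_ranges histogram)

-- ===== LEMMAS AND PROOFS =====

-- recursive characterizations of the start/end boundary lists, carrying the
-- "previous element was positive" flag and the absolute Int offset
def pvSb : List Int → Bool → Int → List Int
  | [], _, _ => []
  | v :: t, prevPos, j =>
      (if 0 < v ∧ prevPos = false then [j] else []) ++ pvSb t (decide (0 < v)) (j + 1)

def pvEb : List Int → Bool → Int → List Int
  | [], prevPos, j => if prevPos then [j - 1] else []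
  | v :: t, prevPos, j =>
      (if prevPos = true ∧ v ≤ 0 then [j - 1] else []) ++ pvEb t (decide (0 < v)) (j + 1)

theorem pvAGo_eq (t : List Int) :
    (∀ j ranges, pvAGo t j none ranges = ranges ++ (pvSb t false j).zip (pvEb t false j)) ∧
    (∀ s j ranges, pvAGo t j (some s) ranges =
        ranges ++ (s :: pvSb t true j).zip (pvEb t true j)) := by
  induction t with
  | nil => simp [pvAGo, pvSb, pvEb]
  | cons v rest ih =>
    obtain ⟨ihn, ihs⟩ := ih
    by_cases hv : 0 < v
    · constructor
      · intro j ranges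
        rw [show pvAGo (v :: rest) j none ranges = pvAGo rest (j + 1) (some j) ranges by
              simp [pvAGo, hv]]
        simp [pvSb, pvEb, hv, ihs]
      · intro s j ranges
        rw [show pvAGo (v :: rest) j (some s) ranges = pvAGo rest (j + 1) (some s) ranges by
              simp [pvAGo, not_le.mpr hv]]
        simp [pvSb, pvEb, hv, not_le.mpr hv, ihs]
    · constructor
      · intro j ranges
        rw [show pvAGo (v :: rest) j none ranges = pvAGo rest (j + 1) none ranges by
              simp [pvAGo, hv]]
        simp [pvSb, pvEb, hv, ihn]
      · intro s j ranges
        rw [show pvAGo (v :: rest) j (some s) ranges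
              = pvAGo rest (j + 1) none (ranges ++ [(s, j - 1)]) by
              simp [pvAGo, not_lt.mp hv]]
        simp [pvSb, pvEb, hv, not_lt.mp hv, ihn]

-- the recursive start list equals B's filtered comprehension (with prev flag generalized)
theorem pvSb_filter (t : List Int) : ∀ (b : Bool) (j : Int),
    pvSb t b j = ((List.range t.length).filter (fun i =>
        decide (0 < t.getD i 0) &&
          (if i == 0 then !b else decide (t.getD (i - 1) 0 ≤ 0)))).map
      (fun (i : Nat) => j + (i : Int)) := by
  induction t with
  | nil => simp [pvSb]
  | cons v rest ih =>
    intro b j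
    rw [pvSb]; simp only [List.length_cons]; rw [List.range_succ_eq_map, List.filter_cons, List.filter_map]
    have hshift : (List.range rest.length).filter
          ((fun i => decide (0 < (v :: rest).getD i 0) &&
            (if i == 0 then !b else decide ((v :: rest).getD (i - 1) 0 ≤ 0))) ∘ Nat.succ)
        = (List.range rest.length).filter (fun i =>
            decide (0 < rest.getD i 0) &&
              (if i == 0 then !(decide (0 < v)) else decide (rest.getD (i - 1) 0 ≤ 0))) := by
      apply List.filter_congr
      intro i _
      cases i with
      | zero =>
        by_cases h0 : 0 < v
        · simp [Function.comp, h0, not_le.mpr h0]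
        · simp [Function.comp, h0, not_lt.mp h0]
      | succ k => simp [Function.comp]
    rw [hshift, ih (decide (0 < v)) (j + 1)]
    by_cases hv : 0 < v
    · cases b <;> simp [hv, List.map_map, Function.comp] <;> intros <;> omega
    · simp [hv, List.map_map, Function.comp]
      intros; omega

-- head-non-positive-or-empty test used by the end characterization
def pvHNP : List Int → Bool
  | [] => true
  | v :: _ => decide (v ≤ 0)

-- the recursive end list equals B's filtered comprehension plus the pending end j-1
theorem pvEb_filter (t : List Int) : ∀ (b : Bool) (j : Int),
    pvEb t b j = (if b ∧ pvHNP t then [j - 1] else []) ++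
      ((List.range t.length).filter (fun i =>
          decide (0 < t.getD i 0) &&
            (i == t.length - 1 || decide (t.getD (i + 1) 0 ≤ 0)))).map
        (fun (i : Nat) => j + (i : Int)) := by
  induction t with
  | nil => intro b j; cases b <;> simp [pvEb, pvHNP]
  | cons v rest ih =>
    intro b j
    rw [pvEb]; simp only [List.length_cons]; rw [List.range_succ_eq_map, List.filter_cons, List.filter_map]
    have hshift : (List.range rest.length).filter
          ((fun i => decide (0 < (v :: rest).getD i 0) &&
            (i == rest.length + 1 - 1 || decide ((v :: rest).getD (i + 1) 0 ≤ 0))) ∘ Nat.succ)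
        = (List.range rest.length).filter (fun i =>
            decide (0 < rest.getD i 0) &&
              (i == rest.length - 1 || decide (rest.getD (i + 1) 0 ≤ 0))) := by
      apply List.filter_congr
      intro i hi
      have hi' : i < rest.length := List.mem_range.mp hi
      have hkey : ((i + 1 : Nat) == rest.length) = (i == rest.length - 1) := by
        by_cases h : i + 1 = rest.length
        · simp [show i = rest.length - 1 by omega]; omega
        · simp [h, show ¬ i = rest.length - 1 by omega]
      simp [Function.comp, hkey]
    rw [hshift, ih (decide (0 < v)) (j + 1)]
    cases rest with
    | nil =>
      by_cases hv : 0 < v <;> cases b <;>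
        simp [pvHNP, hv, not_lt.mp, not_le.mpr]
    | cons w r =>
      by_cases hv : 0 < v <;> by_cases hw : 0 < w
      · cases b <;> simp [pvHNP, hv, not_le.mpr hv, not_le.mpr hw, List.map_map, Function.comp] <;> intros <;> omega
      · cases b <;> simp [pvHNP, hv, not_le.mpr hv, not_lt.mp hw, List.map_map, Function.comp] <;> intros <;> omega
      · cases b <;> simp [pvHNP, hv, not_lt.mp hv, not_le.mpr hw, List.map_map, Function.comp] <;> intros <;> omega
      · cases b <;> simp [pvHNP, hv, not_lt.mp hv, not_lt.mp hw, List.map_map, Function.comp] <;> intros <;> omega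

-- ===== VERDICT (by name: the statement is the Claim_ definition above) =====
theorem identify_energy_bar_ranges_spec : Claim_equal_identify_energy_bar_ranges := by
  intro histogram _
  unfold Spec_identify_energy_bar_ranges identify_energy_bar_ranges identify_energy_bar_ranges_alt
  rw [(pvAGo_eq histogram).1 0 [], pvSb_filter histogram false 0, pvEb_filter histogram false 0]
  have hpred : (List.range histogram.length).filter (fun i =>
        decide (0 < histogram.getD i 0) &&
          (if i == 0 then true else decide (histogram.getD (i - 1) 0 ≤ 0)))
      = (List.range histogram.length).filter (fun i =>
        decide (0 < histogram.getD i 0) && (i == 0 || decide (histogram.getD (i - 1) 0 ≤ 0))) := by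
    apply List.filter_congr
    intro i _
    cases i <;> simp
  simp only [Bool.not_false, Bool.false_eq_true, false_and, if_false, List.nil_append]
  rw [hpred, List.zip_map]
  apply List.map_congr_left
  intro p _
  simp [Prod.map]
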